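-- pv_equiv track=rewrite | github.com/need-singularity/sylvian-singularity | math/frontier_900_verify.py | psi
-- ===== SOURCE A (Python) =====
-- def psi(n):
--     r, t = n, n
--     primes = []
--     p = 2
--     while p*p<=t:
--         if t%p==0:
--             primes.append(p)
--             while t%p==0: t//=p
--         p+=1
--     if t>1: primes.append(t)
--     for p in primes: r = r*(p+1)//p
--     return r
-- ===== SOURCE B (Python) =====
-- def psi(n):
--     # psi is multiplicative with psi(p^k) = p^(k-1) * (p+1): build the answer as a
--     # product of prime-power contributions, one recursive call per distinct prime,
--     # never dividing the accumulator.
--     if n <= 1: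
--         return n
--     def go(m, p):
--         if m == 1:
--             return 1
--         while p * p <= m and m % p != 0:
--             p += 1
--         if p * p <= m:
--             m //= p
--             pw = 1
--             while m % p == 0:
--                 m //= p
--                 pw *= p
--             return pw * (p + 1) * go(m, p + 1)
--         return m + 1
--     return go(n, 2)
-- ===== Notes on version B (the rewrite author's own statement) =====
-- stated objective: alternative
-- what changed: B computes psi multiplicatively by recursion on the cofactor: it seeks the smallest remaining prime factor p, strips its full power p^k while accumulating p^(k-1), and multiplies the contribution p^(k-1)*(p+1) into the recursive result, so the accumulator is never divided; A instead collects a prime list and runs a second pass of exact-division steps r = r*(p+1)//p starting from n.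
import Mathlib
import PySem

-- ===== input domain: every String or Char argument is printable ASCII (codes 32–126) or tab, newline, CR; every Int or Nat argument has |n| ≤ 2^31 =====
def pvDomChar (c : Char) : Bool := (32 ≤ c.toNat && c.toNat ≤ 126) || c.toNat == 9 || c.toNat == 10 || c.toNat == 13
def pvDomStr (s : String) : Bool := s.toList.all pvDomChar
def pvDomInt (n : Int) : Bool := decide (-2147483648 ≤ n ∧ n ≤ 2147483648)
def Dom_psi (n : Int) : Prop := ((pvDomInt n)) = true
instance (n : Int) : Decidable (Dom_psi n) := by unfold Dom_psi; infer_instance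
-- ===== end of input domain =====

-- B computes psi multiplicatively (psi(p^k) = p^(k-1)*(p+1)) by recursion on the remaining
-- cofactor, never dividing the accumulator; A collects a prime list and then folds exact
-- divisions r = r*(p+1)//p. Objective: alternative (same O(sqrt n) cost).

-- ===== PORT A =====
-- arithmetic fact used by the termination proofs of the ports
theorem pv_two_mul_le (p t : Int) (hp : 2 ≤ p) (hpt : p * p ≤ t) : 2 * p ≤ t :=
  le_trans (mul_le_mul_of_nonneg_right hp (by omega)) hpt

theorem pv_ediv_aux (p t : Int) (hp : 2 ≤ p) (ht : 0 < t) (hm : PySem.Int.mod t p = 0) :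
    0 < PySem.Int.floordiv t p ∧ PySem.Int.floordiv t p < t := by
  have hp0 : (0:Int) < p := by omega
  rw [PySem.Int.floordiv_eq_ediv_of_pos hp0]
  rw [PySem.Int.mod_eq_emod_of_pos hp0] at hm
  obtain ⟨k, hk⟩ := Int.dvd_of_emod_eq_zero hm
  have hk0 : 0 < k := by
    by_contra hk'
    have hk2 : k ≤ 0 := by omega
    have h0 : p * k ≤ p * 0 := mul_le_mul_of_nonneg_left hk2 (by omega)
    rw [mul_zero] at h0
    omega
  have h2k : 2 * k ≤ p * k := mul_le_mul_of_nonneg_right hp (by omega)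
  rw [hk, Int.mul_ediv_cancel_left k (by omega : p ≠ 0)]
  constructor
  · exact hk0
  · linarith

-- inner 'while t%p==0: t//=p' of A (the guards 2 ≤ p, 0 < t only totalize; they hold on every reachable call)
-- the termination measures of all loops below, as named theorems (cited by the ports)
theorem pv_toNat_lt (a b : Int) (hb : 0 < b) (hab : a < b) : a.toNat < b.toNat :=
  (Int.toNat_lt_toNat hb).mpr hab

theorem pv_dec_strip (p t : Int) (h : 2 ≤ p ∧ 0 < t ∧ PySem.Int.mod t p = 0) :
    (PySem.Int.floordiv t p).toNat < t.toNat :=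
  pv_toNat_lt _ _ h.2.1 (pv_ediv_aux p t h.1 h.2.1 h.2.2).2

theorem pv_dec_skip (t p : Int) (hp : 2 ≤ p) (hpt : p * p ≤ t) :
    (t - (p + 1)).toNat < (t - p).toNat := by
  have h2p := pv_two_mul_le p t hp hpt
  exact pv_toNat_lt _ _ (by linarith) (by linarith)

def pyStrip (p t : Int) : Int :=
  if h : 2 ≤ p ∧ 0 < t ∧ PySem.Int.mod t p = 0 then pyStrip p (PySem.Int.floordiv t p) else t
termination_by t.toNat
decreasing_by exact pv_dec_strip p t h

theorem pyStrip_pos_le (p t : Int) : 0 < t → 0 < pyStrip p t ∧ pyStrip p t ≤ t := by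
  fun_induction pyStrip p t with
  | case1 t h ih =>
    intro _
    have hd := pv_ediv_aux p t h.1 h.2.1 h.2.2
    have := ih hd.1
    exact ⟨this.1, by omega⟩
  | case2 t h => intro ht; exact ⟨ht, le_refl t⟩

-- outer while-loop of A: collects the distinct prime factors of t into 'primes'
-- (the guard 2 ≤ p only totalizes; p starts at 2 and only grows)
theorem pv_dec_loopA (t p : Int) (h : 2 ≤ p ∧ p * p ≤ t) :
    (pyStrip p t - (p + 1)).toNat < (t - p).toNat := by
  have h2p := pv_two_mul_le p t h.1 h.2
  have hs := pyStrip_pos_le p t (by linarith [h.1])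
  exact pv_toNat_lt _ _ (by linarith [h.1]) (by linarith [h.1, hs.2])

def loopA (t p : Int) (primes : List Int) : List Int × Int :=
  if h : 2 ≤ p ∧ p * p ≤ t then
    if PySem.Int.mod t p = 0 then loopA (pyStrip p t) (p + 1) (primes ++ [p])
    else loopA t (p + 1) primes
  else (primes, t)
termination_by (t - p).toNat
decreasing_by
  · exact pv_dec_loopA t p h
  · exact pv_dec_skip t p h.1 h.2

def psi (n : Int) : Int :=
  let res := loopA n 2 []
  let primes := if 1 < res.2 then res.1 ++ [res.2] else res.1
  primes.foldl (fun r p => PySem.Int.floordiv (r * (p + 1)) p) n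

-- ===== PORT B =====
-- inner 'while m%p==0: m//=p; pw*=p' of B (guards 2 ≤ p, 0 < m only totalize)
def stripPow (p m pw : Int) : Int × Int :=
  if h : 2 ≤ p ∧ 0 < m ∧ PySem.Int.mod m p = 0 then
    stripPow p (PySem.Int.floordiv m p) (pw * p)
  else (m, pw)
termination_by m.toNat
decreasing_by exact pv_dec_strip p m h

theorem stripPow_pos_le (p m pw : Int) : 0 < m → 0 < (stripPow p m pw).1 ∧ (stripPow p m pw).1 ≤ m := by
  fun_induction stripPow p m pw with
  | case1 m pw h ih =>
    intro _
    have hd := pv_ediv_aux p m h.1 h.2.1 h.2.2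
    have := ih hd.1
    exact ⟨this.1, by omega⟩
  | case2 m pw h => intro hm; exact ⟨hm, le_refl m⟩

-- seek loop of B: 'while p*p <= m and m % p != 0: p += 1' (the guard 2 ≤ p only totalizes)
def seekB (m p : Int) : Int :=
  if h : 2 ≤ p ∧ p * p ≤ m ∧ ¬ PySem.Int.mod m p = 0 then seekB m (p + 1) else p
termination_by (m - p).toNat
decreasing_by exact pv_dec_skip m p h.1 h.2.1

theorem seekB_ge (m p : Int) : p ≤ seekB m p := by
  fun_induction seekB m p with
  | case1 p h ih => omega
  | case2 p h => exact le_refl p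

-- division bound used by goB's termination (no divisibility needed)
theorem pv_ediv_aux2 (q m : Int) (hq : 2 ≤ q) (hm : q ≤ m) :
    1 ≤ PySem.Int.floordiv m q ∧ PySem.Int.floordiv m q < m := by
  rw [PySem.Int.floordiv_eq_ediv_of_pos (by omega : (0:Int) < q)]
  have h1 := Int.ediv_add_emod m q
  have h2 := Int.emod_nonneg m (by omega : q ≠ 0)
  have h3 := Int.emod_lt_of_pos m (by omega : (0:Int) < q)
  have hd0 : 0 ≤ m / q := Int.ediv_nonneg (by omega) (by omega)
  have h4 : 2 * (m / q) ≤ q * (m / q) := mul_le_mul_of_nonneg_right hq hd0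
  have h5 : q * (m / q) ≤ m := by linarith
  have hd1 : 1 ≤ m / q := by
    rcases eq_or_lt_of_le hd0 with hd | hd
    · exfalso
      rw [← hd, mul_zero] at h1
      omega
    · omega
  exact ⟨hd1, by linarith⟩

theorem pv_dec_goB (m p : Int) (h : 2 ≤ seekB m p ∧ seekB m p * seekB m p ≤ m) :
    ((stripPow (seekB m p) (PySem.Int.floordiv m (seekB m p)) 1).1 - (seekB m p + 1)).toNat
      < (m - p).toNat := by
  have h2q := pv_two_mul_le (seekB m p) m h.1 h.2
  have hqm : seekB m p ≤ m := by linarith [h.1]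
  have hpq := seekB_ge m p
  have hd := pv_ediv_aux2 (seekB m p) m h.1 hqm
  have hs := stripPow_pos_le (seekB m p) (PySem.Int.floordiv m (seekB m p)) 1 (by linarith [hd.1])
  exact pv_toNat_lt _ _ (by linarith [h.1]) (by linarith [h.1, hs.2, hd.2])

-- recursive 'go(m, p)' of B, one call per distinct prime factor
-- (the guard 2 ≤ seekB m p only totalizes; p starts at 2 and only grows)
def goB (m p : Int) : Int :=
  if m = 1 then 1
  else if h : 2 ≤ seekB m p ∧ seekB m p * seekB m p ≤ m then
    (stripPow (seekB m p) (PySem.Int.floordiv m (seekB m p)) 1).2 * (seekB m p + 1) *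
      goB (stripPow (seekB m p) (PySem.Int.floordiv m (seekB m p)) 1).1 (seekB m p + 1)
  else m + 1
termination_by (m - p).toNat
decreasing_by exact pv_dec_goB m p h

def psi_alt (n : Int) : Int := if n ≤ 1 then n else goB n 2

-- ===== PRECONDITION & SPEC =====
def Spec_psi (n : Int) (out : Int) : Prop := out = psi_alt n
instance (n : Int) (out : Int) : Decidable (Spec_psi n out) := by unfold Spec_psi; infer_instance

-- ===== CLAIM (what is proved, stated in full; the proofs are below) =====
def Claim_equal_psi : Prop := ∀ (n : Int), Dom_psi n → Spec_psi n (psi n)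

-- ===== LEMMAS AND PROOFS =====

-- one-step unfolding lemmas (rw [loopA] alone also unfolds the recursive occurrences)
theorem pyStrip_step (p m : Int) (h : 2 ≤ p ∧ 0 < m ∧ PySem.Int.mod m p = 0) :
    pyStrip p m = pyStrip p (PySem.Int.floordiv m p) := by
  conv_lhs => rw [pyStrip]
  rw [dif_pos h]

theorem loopA_step_div (t p : Int) (ps : List Int) (h : 2 ≤ p ∧ p * p ≤ t)
    (hmod : PySem.Int.mod t p = 0) :
    loopA t p ps = loopA (pyStrip p t) (p + 1) (ps ++ [p]) := by
  conv_lhs => rw [loopA]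
  rw [dif_pos h, if_pos hmod]

theorem loopA_step_skip (t p : Int) (ps : List Int) (h : 2 ≤ p ∧ p * p ≤ t)
    (hmod : ¬ PySem.Int.mod t p = 0) :
    loopA t p ps = loopA t (p + 1) ps := by
  conv_lhs => rw [loopA]
  rw [dif_pos h, if_neg hmod]

theorem loopA_step_exit (t p : Int) (ps : List Int) (h : ¬ (2 ≤ p ∧ p * p ≤ t)) :
    loopA t p ps = (ps, t) := by
  conv_lhs => rw [loopA]
  rw [dif_neg h]

-- A's accumulator is write-only: loopA only appends to it
theorem loopA_acc_aux (t p : Int) (qs : List Int) : ∀ ps : List Int,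
    loopA t p (ps ++ qs) = (ps ++ (loopA t p qs).1, (loopA t p qs).2) := by
  fun_induction loopA t p qs with
  | case1 t p qs h hmod ih =>
    intro ps
    rw [loopA_step_div t p (ps ++ qs) h hmod,
        show (ps ++ qs) ++ [p] = ps ++ (qs ++ [p]) by simp]
    exact ih ps
  | case2 t p qs h hmod ih =>
    intro ps
    rw [loopA_step_skip t p (ps ++ qs) h hmod]
    exact ih ps
  | case3 t p qs h =>
    intro ps
    rw [loopA_step_exit t p (ps ++ qs) h]

theorem loopA_acc (t p : Int) (ps : List Int) :
    loopA t p ps = (ps ++ (loopA t p []).1, (loopA t p []).2) := by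
  have := loopA_acc_aux t p [] ps
  simpa using this

-- stripPow strips the same cofactor as A's pyStrip, and records the stripped multiplier
theorem stripPow_spec (p m pw : Int) (hp : 2 ≤ p) : 0 < m →
    ∃ w : Int, stripPow p m pw = (pyStrip p m, pw * w) ∧ m = w * pyStrip p m ∧ 0 < w := by
  fun_induction stripPow p m pw with
  | case1 m pw h ih =>
    intro _
    have hd := pv_ediv_aux p m h.1 h.2.1 h.2.2
    obtain ⟨w', hw1, hw2, hw3⟩ := ih hd.1
    refine ⟨p * w', ?_, ?_, by nlinarith [h.1]⟩
    · rw [hw1, pyStrip_step p m h]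
      refine Prod.ext rfl ?_
      simp only []
      ring
    · rw [pyStrip_step p m h]
      calc m = p * PySem.Int.floordiv m p := by
              have hp0 : (0:Int) < p := by omega
              rw [PySem.Int.mod_eq_emod_of_pos hp0] at h
              obtain ⟨k, hk⟩ := Int.dvd_of_emod_eq_zero h.2.2
              rw [PySem.Int.floordiv_eq_ediv_of_pos hp0, hk,
                  Int.mul_ediv_cancel_left k (by omega : p ≠ 0)]
        _ = p * (w' * pyStrip p (PySem.Int.floordiv m p)) := by rw [← hw2]
        _ = p * w' * pyStrip p (PySem.Int.floordiv m p) := by ring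
  | case2 m pw h =>
    intro hm
    refine ⟨1, ?_, ?_, one_pos⟩
    · conv_rhs => rw [pyStrip]
      rw [dif_neg h]
      simp
    · conv_rhs => rw [pyStrip]
      rw [dif_neg h]
      ring

-- seekB stops at the first q ≥ p with q*q > m or q | m
theorem seekB_spec (m p : Int) : 2 ≤ p →
    2 ≤ seekB m p ∧ (¬ seekB m p * seekB m p ≤ m ∨ PySem.Int.mod m (seekB m p) = 0) := by
  fun_induction seekB m p with
  | case1 p h ih =>
    intro _
    exact ih (by omega)
  | case2 p h =>
    intro hp
    refine ⟨hp, ?_⟩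
    by_cases hmod : PySem.Int.mod m p = 0
    · exact Or.inr hmod
    · exact Or.inl (fun hle => h ⟨hp, hle, hmod⟩)

-- A's outer loop just skips the p's that seekB skips
theorem loopA_seek (m p : Int) (ps : List Int) : loopA m p ps = loopA m (seekB m p) ps := by
  fun_induction seekB m p with
  | case1 p h ih =>
    rw [loopA_step_skip m p ps ⟨h.1, h.2.1⟩ h.2.2]
    exact ih
  | case2 p h => rfl

-- main invariant: folding A's exact-division steps over the primes that loopA will still
-- collect from t, starting from a multiple s*t, gives s times B's multiplicative product
theorem loopA_goB (t p : Int) : 2 ≤ p → 1 ≤ t → ∀ s : Int,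
    (if 1 < (loopA t p []).2 then (loopA t p []).1 ++ [(loopA t p []).2]
     else (loopA t p []).1).foldl (fun r q => PySem.Int.floordiv (r * (q + 1)) q) (s * t)
      = s * goB t p := by
  fun_induction goB t p with
  | case1 p =>
    intro hp _ s
    rw [loopA_step_exit 1 p [] (fun hcon => by have := pv_two_mul_le p 1 hcon.1 hcon.2; omega)]
    simp
  | case2 m p hm1 h ih =>
    intro hp ht s
    have hq2 : 2 ≤ seekB m p := h.1
    have hmod : PySem.Int.mod m (seekB m p) = 0 := by
      rcases (seekB_spec m p hp).2 with hgt | hm0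
      · exact absurd h.2 hgt
      · exact hm0
    have h2q := pv_two_mul_le (seekB m p) m h.1 h.2
    have hm : 0 < m := by omega
    have hqm : seekB m p ≤ m := by omega
    have hd := pv_ediv_aux2 (seekB m p) m hq2 hqm
    set q := seekB m p with hqdef
    obtain ⟨w, hw1, hw2, hw3⟩ := stripPow_spec q (PySem.Int.floordiv m q) 1 hq2 (by omega)
    have hstrip : pyStrip q m = pyStrip q (PySem.Int.floordiv m q) :=
      pyStrip_step q m ⟨hq2, hm, hmod⟩
    have hspos : 0 < pyStrip q (PySem.Int.floordiv m q) :=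
      (pyStrip_pos_le q (PySem.Int.floordiv m q) (by omega)).1
    have hw2' : m = q * (w * pyStrip q (PySem.Int.floordiv m q)) := by
      have hq0 : (0:Int) < q := by omega
      have hmod' := hmod
      rw [PySem.Int.mod_eq_emod_of_pos hq0] at hmod'
      obtain ⟨k, hk⟩ := Int.dvd_of_emod_eq_zero hmod'
      have hfk : PySem.Int.floordiv m q = k := by
        rw [PySem.Int.floordiv_eq_ediv_of_pos hq0, hk,
            Int.mul_ediv_cancel_left k (by omega : q ≠ 0)]
      rw [hfk] at hw2
      conv_lhs => rw [hk]
      rw [hfk, ← hw2]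
    rw [loopA_seek m p [], ← hqdef, loopA_step_div m q [] ⟨hq2, h.2⟩ hmod, loopA_acc, hstrip]
    rw [hw1] at ih ⊢
    simp only [List.nil_append] at ih ⊢
    set y := pyStrip q (PySem.Int.floordiv m q) with hy
    have hIH := ih (by omega) (by omega) (s * w * (q + 1))
    have hstep : PySem.Int.floordiv (s * m * (q + 1)) q = s * w * (q + 1) * y := by
      have hq0 : (0:Int) < q := by omega
      rw [PySem.Int.floordiv_eq_ediv_of_pos hq0, hw2',
          show s * (q * (w * y)) * (q + 1) = q * (s * w * (q + 1) * y) by ring,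
          Int.mul_ediv_cancel_left _ (by omega : q ≠ 0)]
    by_cases hlt : 1 < (loopA y (q + 1) []).2
    · rw [if_pos (by simpa using hlt)]
      rw [if_pos hlt] at hIH
      simp only [List.cons_append, List.nil_append, List.foldl_cons, List.foldl_append] at hIH ⊢
      rw [hstep]
      calc _ = s * w * (q + 1) * goB y (q + 1) := hIH
        _ = s * (1 * w * (q + 1) * goB y (q + 1)) := by ring
    · rw [if_neg (by simpa using hlt)]
      rw [if_neg hlt] at hIH
      simp only [List.cons_append, List.nil_append, List.foldl_cons] at hIH ⊢
      rw [hstep]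
      calc _ = s * w * (q + 1) * goB y (q + 1) := hIH
        _ = s * (1 * w * (q + 1) * goB y (q + 1)) := by ring
  | case3 m p hm1 h =>
    intro hp ht s
    have hq2 : 2 ≤ seekB m p := le_trans hp (seekB_ge m p)
    rw [loopA_seek m p [], loopA_step_exit m (seekB m p) [] h]
    have hmgt : 1 < m := by omega
    simp only [if_pos hmgt, List.foldl_cons, List.foldl_nil, List.nil_append]
    rw [PySem.Int.floordiv_eq_ediv_of_pos (by omega : (0:Int) < m),
        show s * m * (m + 1) = m * (s * (m + 1)) by ring,
        Int.mul_ediv_cancel_left _ (by omega : m ≠ 0)]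

-- ===== VERDICT (by name: the statement is the Claim_ definition above) =====
theorem psi_spec : Claim_equal_psi := by
  intro n _
  show psi n = psi_alt n
  unfold psi psi_alt
  by_cases hn : n ≤ 1
  · rw [loopA_step_exit n 2 [] (fun hcon => by omega)]
    simp [hn, show ¬ (1:Int) < n by omega]
  · have := loopA_goB n 2 (by omega) (by omega) 1
    rw [one_mul] at this
    rw [if_neg hn]
    simpa using this
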